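-- pv_equiv track=rewrite | github.com/CharlesLiu02/datagood-mentor-project | CS61A/Practice_Midterms/Recursion.py | can_win1
-- ===== SOURCE A (Python) =====
-- def can_win1(number):
--     if number <= 0:
--         return False
--     action = 1
--     while action <= 3:
--         new_state = number - action
--         if not can_win1 ( new_state ):
--             return True
--         action += 1
--     return False
-- ===== SOURCE B (Python) =====
-- def can_win1(number):
--     return number > 0 and number % 4 != 0
-- ===== Notes on version B (the rewrite author's own statement) =====
-- stated objective: alternative
-- what changed: Replaced the exponential recursive game search with the closed-form modular win condition (positive and not a multiple of four); intended as asymptotically faster — a timing run's largest rungs time A out, so the measurement depends on the run.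
import Mathlib
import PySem

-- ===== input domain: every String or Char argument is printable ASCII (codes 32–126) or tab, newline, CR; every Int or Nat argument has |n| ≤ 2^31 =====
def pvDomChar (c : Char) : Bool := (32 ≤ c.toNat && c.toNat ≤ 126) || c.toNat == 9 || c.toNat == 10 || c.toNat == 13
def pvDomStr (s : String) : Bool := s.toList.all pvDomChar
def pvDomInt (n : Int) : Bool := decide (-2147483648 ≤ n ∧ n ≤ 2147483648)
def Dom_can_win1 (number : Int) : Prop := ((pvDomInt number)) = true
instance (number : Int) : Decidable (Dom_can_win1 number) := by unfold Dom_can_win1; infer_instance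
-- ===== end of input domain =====

-- B replaces A's recursive game search with the closed-form modular win condition.


-- ===== PORT A =====
-- A's bounded while-loop (action = 1, 2, 3) is unrolled step for step; each
-- iteration checks `if not can_win1(number - action): return True`.
def can_win1 (number : Int) : Bool :=
  if h : number ≤ 0 then false
  else
    if !can_win1 (number - 1) then true
    else if !can_win1 (number - 2) then true
    else if !can_win1 (number - 3) then true
    else false
termination_by number.toNat
decreasing_by all_goals omega

-- ===== PORT B =====
-- Python's `%` with positive divisor 4 agrees with Lean's Int.emod.
def can_win1_alt (number : Int) : Bool :=
  decide (number > 0) && decide (number % 4 ≠ 0)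

-- ===== PRECONDITION & SPEC =====
-- A recurses with depth ~ number, so for large positive numbers it raises
-- RecursionError (Python's recursion limit is 1000); Pre_ keeps a safety margin
-- below that limit and excludes nothing else.
def Pre_can_win1 (number : Int) : Prop := number ≤ 900
instance (number : Int) : Decidable (Pre_can_win1 number) := by unfold Pre_can_win1; infer_instance
def pvWitness_can_win1 : Int := (7)

def Spec_can_win1 (number : Int) (out : Bool) : Prop := out = can_win1_alt number
instance (number : Int) (out : Bool) : Decidable (Spec_can_win1 number out) := by unfold Spec_can_win1; infer_instance

-- ===== CLAIM (what is proved, stated in full; the proofs are below) =====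
def Claim_equal_can_win1 : Prop := ∀ (number : Int), Dom_can_win1 number → Pre_can_win1 number → Spec_can_win1 number (can_win1 number)

-- ===== LEMMAS AND PROOFS =====
theorem can_win1_aux : ∀ (k : Nat) (n : Int), n.toNat ≤ k → can_win1 n = can_win1_alt n := by
  intro k
  induction k with
  | zero =>
    intro n hn
    have hle : n ≤ 0 := by omega
    rw [can_win1]
    simp [hle, can_win1_alt]
  | succ k ih =>
    intro n hn
    by_cases hle : n ≤ 0
    · rw [can_win1]
      simp [hle, can_win1_alt]
    · rw [can_win1,
        ih (n - 1) (by omega), ih (n - 2) (by omega), ih (n - 3) (by omega)]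
      simp only [can_win1_alt, hle, dite_eq_ite]
      rw [Bool.eq_iff_iff]
      simp only [Bool.if_true_left, Bool.if_false_right,
        Bool.not_eq_true', Bool.and_eq_true, Bool.and_eq_false_iff,
        decide_eq_true_eq, decide_eq_false_iff_not]
      simp only [if_false, Bool.and_true, Bool.or_eq_true, decide_eq_true_eq]
      omega

theorem can_win1_eq_alt (number : Int) : can_win1 number = can_win1_alt number :=
  can_win1_aux number.toNat number (le_refl _)

-- ===== VERDICT =====
theorem can_win1_spec : Claim_equal_can_win1 := by
  intro n _ _
  unfold Spec_can_win1
  exact can_win1_eq_alt n
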